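-- pv_equiv track=rewrite | github.com/bob85670/2119_Graph | 2021/A3/A3.py | leastNumBus
-- ===== SOURCE A (Python) =====
-- from collections import defaultdict, deque
--
-- def leastNumBus(routes, source, target):
--     """
--     :type routes: List[List[int]]
--     :type source: int
--     :type target: int
--     :rtype: int
--     """
--
--     if source == target:
--         return 0;
--
--     stop_to_routes = defaultdict(list)
--     for i, route in enumerate(routes):
--         for stop in route:
--             stop_to_routes[stop].append(i)
--
--     if source not in stop_to_routes or target not in stop_to_routes:
--         return -1
--
--     # Model as
--     # Node: bus route
--     # Edge: pairs of routes that share at least 1 bus stop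
--     graph = defaultdict(list);
--     for stop, route_list in stop_to_routes.items():
--         for i in range(len(route_list)):
--             for j in range(i + 1, len(route_list)):
--                 r1, r2 = route_list[i], route_list[j]
--                 graph[r1].append(r2)
--                 graph[r2].append(r1)
--
--     # BFS
--     queue = deque([(route, 1) for route in stop_to_routes[source]]) # (route, count)
--     visited = set()
--     while (queue):
--         curr_route, trip = queue.popleft()
--         if curr_route in visited:
--             continue
--         visited.add(curr_route)
--
--         if target in routes[curr_route]:
--             return trip
--
--         for next_route in graph[curr_route]:
--             if next_route not in visited:
--                 queue.append((next_route, trip + 1))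
--     return -1
-- ===== SOURCE B (Python) =====
-- def leastNumBus(routes, source, target):
--     if source == target:
--         return 0
--     stop_to_routes = {}
--     for i, route in enumerate(routes):
--         for stop in route:
--             stop_to_routes.setdefault(stop, []).append(i)
--     frontier = stop_to_routes.get(source, [])
--     seen = set(frontier)
--     buses = 1
--     while frontier:
--         nxt = []
--         for r in frontier:
--             if target in routes[r]:
--                 return buses
--             for stop in routes[r]:
--                 for r2 in stop_to_routes[stop]:
--                     if r2 not in seen:
--                         seen.add(r2)
--                         nxt.append(r2)
--         frontier = nxt
--         buses += 1
--     return -1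
-- ===== Notes on version B (the rewrite author's own statement) =====
-- stated objective: alternative
-- what changed: A builds a pairwise route-route adjacency graph (for every stop, all pairs of routes through it) and runs a deque BFS with a visited-on-pop check; B drops the pairwise graph entirely and does a level-by-level BFS over routes, expanding each frontier route directly through the stop-to-routes index with a seen-at-enqueue set.
import Mathlib
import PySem

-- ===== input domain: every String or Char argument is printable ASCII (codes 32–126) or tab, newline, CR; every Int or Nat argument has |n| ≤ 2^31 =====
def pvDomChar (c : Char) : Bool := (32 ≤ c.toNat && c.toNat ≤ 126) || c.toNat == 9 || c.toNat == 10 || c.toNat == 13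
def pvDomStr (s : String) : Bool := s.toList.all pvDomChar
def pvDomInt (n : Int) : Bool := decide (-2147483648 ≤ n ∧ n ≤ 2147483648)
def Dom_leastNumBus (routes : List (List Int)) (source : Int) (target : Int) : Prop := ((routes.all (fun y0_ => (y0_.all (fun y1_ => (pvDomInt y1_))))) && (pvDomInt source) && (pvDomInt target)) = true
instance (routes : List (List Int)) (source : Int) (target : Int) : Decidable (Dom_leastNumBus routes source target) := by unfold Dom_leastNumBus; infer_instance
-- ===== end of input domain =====

-- B replaces A's pairwise route-route graph + deque BFS by a level-by-level BFS over routes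
-- that expands each route through the stop→routes index directly (no pairwise graph is built).

-- ===== PORT A =====
-- stop_to_routes: defaultdict(list); stop_to_routes[stop].append(i)
def pvIndexA (routes : List (List Int)) : PySem.Dict Int (List Int) :=
  (PySem.List.enumerate routes).foldl (fun d p =>
    p.2.foldl (fun d stop => d.modify stop [] (fun l => l ++ [p.1])) d) PySem.Dict.empty

-- graph: for each stop's route_list, append r2 to graph[r1] and r1 to graph[r2] for all i<j
def pvGraphA (idx : PySem.Dict Int (List Int)) : PySem.Dict Int (List Int) :=
  idx.items.foldl (fun g p =>
    (PySem.List.pyRange 0 (p.2.length : Int) 1).foldl (fun g i =>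
      (PySem.List.pyRange (i+1) (p.2.length : Int) 1).foldl (fun g j =>
        let r1 := PySem.List.pyGetD p.2 i 0
        let r2 := PySem.List.pyGetD p.2 j 0
        (g.modify r1 [] (fun l => l ++ [r2])).modify r2 [] (fun l => l ++ [r1])) g) g)
    PySem.Dict.empty

-- the while-queue loop; fuel only makes the recursion structural: with the fuel passed below
-- (1 + |queue| + total size of graph's adjacency lists) the 0-fuel arm is never reached,
-- because every iteration pops one entry and pushes only on a first visit.
def pvLoopA (routes : List (List Int)) (graph : PySem.Dict Int (List Int)) (target : Int) :
    Nat → PySem.Set Int → List (Int × Int) → Int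
  | _, _, [] => -1
  | 0, _, _ :: _ => -1
  | f+1, visited, (r, trip) :: rest =>
    if PySem.Set.contains visited r then pvLoopA routes graph target f visited rest
    else
      let visited' := PySem.Set.add visited r
      -- `target in routes[curr_route]`: curr_route is always a valid index (it came from enumerate)
      if ((PySem.List.pyGet? routes r).getD []).contains target then trip
      else pvLoopA routes graph target f visited'
        (rest ++ ((graph.getD r []).filter
          (fun n => !(PySem.Set.contains visited' n))).map (fun n => (n, trip+1)))

def leastNumBus (routes : List (List Int)) (source : Int) (target : Int) : Int :=
  if source == target then 0
  else
    let idx := pvIndexA routes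
    if !(idx.contains source) || !(idx.contains target) then -1
    else
      let graph := pvGraphA idx
      let q := (idx.getD source []).map (fun r => (r, (1 : Int)))
      pvLoopA routes graph target (1 + q.length + (graph.values.map List.length).sum)
        PySem.Set.empty q

-- ===== PORT B =====
-- stop_to_routes: setdefault(stop, []).append(i)  (same association list as A's defaultdict)
def pvIndexB (routes : List (List Int)) : PySem.Dict Int (List Int) :=
  (PySem.List.enumerate routes).foldl (fun d p =>
    p.2.foldl (fun d stop => d.modify stop [] (fun l => l ++ [p.1])) d) PySem.Dict.empty

-- inner two loops of one frontier route r: for stop in routes[r]: for r2 in stop_to_routes[stop]: …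
def pvExpandB (routes : List (List Int)) (idx : PySem.Dict Int (List Int))
    (acc : PySem.Set Int × List Int) (r : Int) : PySem.Set Int × List Int :=
  ((PySem.List.pyGet? routes r).getD []).foldl (fun acc stop =>
    (idx.getD stop []).foldl (fun acc r2 =>
      if PySem.Set.contains acc.1 r2 then acc
      else (PySem.Set.add acc.1 r2, acc.2 ++ [r2])) acc) acc

-- 'for r in frontier: if target in routes[r]: return buses; …' — none signals the return
def pvLevelB (routes : List (List Int)) (idx : PySem.Dict Int (List Int)) (target : Int) :
    List Int → PySem.Set Int × List Int → Option (PySem.Set Int × List Int)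
  | [], acc => some acc
  | r :: rs, acc =>
    if ((PySem.List.pyGet? routes r).getD []).contains target then none
    else pvLevelB routes idx target rs (pvExpandB routes idx acc r)

-- the while-frontier loop; fuel only makes it structural: with fuel = routes.length + 2 the
-- 0-fuel arm is never reached, since every nonempty level adds at least one new route to seen.
def pvLoopB (routes : List (List Int)) (idx : PySem.Dict Int (List Int)) (target : Int) :
    Nat → Int → PySem.Set Int → List Int → Int
  | _, _, _, [] => -1
  | 0, _, _, _ :: _ => -1
  | f+1, buses, seen, r :: rs =>
    match pvLevelB routes idx target (r :: rs) (seen, []) with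
    | none => buses
    | some (seen', nxt) => pvLoopB routes idx target f (buses+1) seen' nxt

def leastNumBus_alt (routes : List (List Int)) (source : Int) (target : Int) : Int :=
  if source == target then 0
  else
    let idx := pvIndexB routes
    let frontier := idx.getD source []
    pvLoopB routes idx target (routes.length + 2) 1 (PySem.Set.ofList frontier) frontier

-- ===== PRECONDITION & SPEC =====
def Spec_leastNumBus (routes : List (List Int)) (source : Int) (target : Int) (out : Int) : Prop := out = leastNumBus_alt routes source target
instance (routes : List (List Int)) (source : Int) (target : Int) (out : Int) : Decidable (Spec_leastNumBus routes source target out) := by unfold Spec_leastNumBus; infer_instance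

-- ===== CLAIM (what is proved, stated in full; the proofs are below) =====
def Claim_equal_leastNumBus : Prop := ∀ (routes : List (List Int)) (source : Int) (target : Int), Dom_leastNumBus routes source target → Spec_leastNumBus routes source target (leastNumBus routes source target)

-- ===== LEMMAS AND PROOFS =====

-- ---- proof-only abbreviations ----
def pvRt (routes : List (List Int)) (r : Int) : List Int := (PySem.List.pyGet? routes r).getD []
def pvHit (routes : List (List Int)) (target r : Int) : Bool := (pvRt routes r).contains target
def pvIdxG (routes : List (List Int)) (stop : Int) : List Int := (pvIndexA routes).getD stop []
def pvVal (routes : List (List Int)) (r : Int) : Prop := 0 ≤ r ∧ r < (routes.length : Int)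
def pvBN (routes : List (List Int)) (r x : Int) : Prop := ∃ stop ∈ pvRt routes r, x ∈ pvIdxG routes stop
def pvS (graph : PySem.Dict Int (List Int)) (V : PySem.Set Int) : Nat :=
  ((graph.items.filter (fun p => !(PySem.Set.contains V p.1))).map (fun p => p.2.length)).sum
def pvStepA (graph : PySem.Dict Int (List Int)) (acc : PySem.Set Int × List Int) (r : Int) :
    PySem.Set Int × List Int :=
  if PySem.Set.contains acc.1 r then acc
  else (PySem.Set.add acc.1 r,
        acc.2 ++ (graph.getD r []).filter (fun n => !(PySem.Set.contains (PySem.Set.add acc.1 r) n)))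

-- ---- index characterization ----
lemma idx_inner_getD (i : Int) (route : List Int) (d : PySem.Dict Int (List Int)) (stop : Int) :
    (route.foldl (fun d stop => d.modify stop [] (fun l => l ++ [i])) d).getD stop []
      = d.getD stop [] ++ List.replicate (route.count stop) i := by
  induction route generalizing d with
  | nil => simp
  | cons a l ih =>
    simp only [List.foldl_cons, List.count_cons, ih]
    rw [PySem.Dict.getD_modify]
    by_cases h : stop = a
    · subst h
      simp only [BEq.rfl, if_pos trivial, List.append_assoc]
      simp [List.replicate_succ]
    · simp [h, Ne.symm h]

lemma idx_inner_contains (i : Int) (route : List Int) (d : PySem.Dict Int (List Int)) (s : Int) :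
    (route.foldl (fun d stop => d.modify stop [] (fun l => l ++ [i])) d).contains s
      = (d.contains s || route.contains s) := by
  induction route generalizing d with
  | nil => simp
  | cons a l ih =>
    simp only [List.foldl_cons, ih, PySem.Dict.contains_modify, List.contains_cons]
    cases h : (s == a) <;> cases d.contains s <;> simp_all [Bool.or_comm]

lemma idx_getD_gen (stop : Int) :
    ∀ (P : List (Int × List Int)) (d : PySem.Dict Int (List Int)),
    (P.foldl (fun d p => p.2.foldl (fun d st => d.modify st [] (fun l => l ++ [p.1])) d) d).getD stop []
      = d.getD stop [] ++ P.flatMap (fun p => List.replicate (p.2.count stop) p.1) := by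
  intro P
  induction P with
  | nil => simp
  | cons p l ih =>
    intro d
    simp only [List.foldl_cons, List.flatMap_cons, ih, idx_inner_getD, List.append_assoc]

lemma mem_idxG (routes : List (List Int)) (stop x : Int) :
    x ∈ pvIdxG routes stop ↔ pvVal routes x ∧ stop ∈ pvRt routes x := by
  unfold pvIdxG pvIndexA
  rw [idx_getD_gen]
  simp only [PySem.Dict.getD_empty, List.nil_append, List.mem_flatMap, List.mem_replicate]
  constructor
  · rintro ⟨p, hp, hcnt, rfl⟩
    rw [PySem.List.mem_enumerate_iff] at hp
    obtain ⟨k, hk, rfl⟩ := hp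
    refine ⟨⟨by simp, by simp; exact_mod_cast hk⟩, ?_⟩
    unfold pvRt
    rw [zero_add, PySem.List.pyGet?_natCast]
    rw [List.getElem?_eq_getElem hk]
    simpa using List.count_pos_iff.mp (Nat.pos_of_ne_zero hcnt)
  · rintro ⟨⟨hx0, hxlt⟩, hstop⟩
    have hk : x.toNat < routes.length := by omega
    have hrt : pvRt routes x = routes[x.toNat] := by
      unfold pvRt
      have h2 := PySem.List.pyGet?_natCast routes x.toNat
      rw [Int.toNat_of_nonneg hx0] at h2
      rw [h2, List.getElem?_eq_getElem hk]
      rfl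
    rw [hrt] at hstop
    refine ⟨(x, routes[x.toNat]), ?_, ?_, rfl⟩
    · rw [PySem.List.mem_enumerate_iff]
      exact ⟨x.toNat, hk, by simp [Int.toNat_of_nonneg hx0]⟩
    · exact (List.count_pos_iff.mpr hstop).ne'

lemma idx_contains_gen (s : Int) :
    ∀ (P : List (Int × List Int)) (d : PySem.Dict Int (List Int)),
    (P.foldl (fun d p => p.2.foldl (fun d st => d.modify st [] (fun l => l ++ [p.1])) d) d).contains s
      = (d.contains s || P.any (fun p => p.2.contains s)) := by
  intro P
  induction P with
  | nil => simp
  | cons p l ih =>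
    intro d
    simp only [List.foldl_cons, List.any_cons, ih, idx_inner_contains, Bool.or_assoc]

lemma idx_contains_iff (routes : List (List Int)) (s : Int) :
    (pvIndexA routes).contains s = true ↔ ∃ x, pvVal routes x ∧ s ∈ pvRt routes x := by
  unfold pvIndexA
  rw [idx_contains_gen]
  simp only [PySem.Dict.contains_empty, Bool.false_or, List.any_eq_true]
  constructor
  · rintro ⟨p, hp, hc⟩
    rw [PySem.List.mem_enumerate_iff] at hp
    obtain ⟨k, hk, rfl⟩ := hp
    refine ⟨(k : Int), ⟨by simp, by exact_mod_cast hk⟩, ?_⟩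
    have h2 := PySem.List.pyGet?_natCast routes k
    unfold pvRt
    rw [h2, List.getElem?_eq_getElem hk]
    simpa using hc
  · rintro ⟨x, ⟨hx0, hxlt⟩, hs⟩
    have hk : x.toNat < routes.length := by omega
    have hrt : pvRt routes x = routes[x.toNat] := by
      unfold pvRt
      have h2 := PySem.List.pyGet?_natCast routes x.toNat
      rw [Int.toNat_of_nonneg hx0] at h2
      rw [h2, List.getElem?_eq_getElem hk]
      rfl
    rw [hrt] at hs
    refine ⟨(x, routes[x.toNat]), ?_, by simpa using hs⟩
    rw [PySem.List.mem_enumerate_iff]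
    exact ⟨x.toNat, hk, by simp [Int.toNat_of_nonneg hx0]⟩

-- ---- generic Dict-fold helpers ----
lemma nodup_keys_modify {d : PySem.Dict Int (List Int)} (k : Int) (d0 : List Int)
    (f : List Int → List Int) (h : d.keys.Nodup) : (d.modify k d0 f).keys.Nodup := by
  rw [PySem.Dict.keys_modify]
  exact PySem.Dict.nodup_keys_insert _ _ _ h

lemma nodup_keys_foldl {β : Type} (step : PySem.Dict Int (List Int) → β → PySem.Dict Int (List Int))
    (hstep : ∀ d b, d.keys.Nodup → (step d b).keys.Nodup) :
    ∀ (l : List β) (d : PySem.Dict Int (List Int)), d.keys.Nodup → (l.foldl step d).keys.Nodup := by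
  intro l
  induction l with
  | nil => intro d h; simpa using h
  | cons b t ih => intro d h; exact ih _ (hstep d b h)

lemma nodup_keys_idx (routes : List (List Int)) : (pvIndexA routes).keys.Nodup := by
  unfold pvIndexA
  apply nodup_keys_foldl _ _ _ PySem.Dict.empty (by simp [PySem.Dict.keys_empty])
  intro d p hd
  exact nodup_keys_foldl _ (fun d st h => nodup_keys_modify _ _ _ h) _ _ hd

lemma nodup_keys_graph (routes : List (List Int)) :
    (pvGraphA (pvIndexA routes)).keys.Nodup := by
  unfold pvGraphA
  apply nodup_keys_foldl _ _ _ PySem.Dict.empty (by simp [PySem.Dict.keys_empty])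
  intro d p hd
  apply nodup_keys_foldl _ _ _ _ hd
  intro d i hd2
  apply nodup_keys_foldl _ _ _ _ hd2
  intro d j hd3
  exact nodup_keys_modify _ _ _ (nodup_keys_modify _ _ _ hd3)

-- ---- graph characterization ----
lemma foldl_getD_mono {β : Type} (step : PySem.Dict Int (List Int) → β → PySem.Dict Int (List Int))
    (hstep : ∀ g b x r, x ∈ g.getD r [] → x ∈ (step g b).getD r []) :
    ∀ (l : List β) (g : PySem.Dict Int (List Int)) (x r : Int),
      x ∈ g.getD r [] → x ∈ (l.foldl step g).getD r [] := by
  intro l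
  induction l with
  | nil => intro g x r h; simpa using h
  | cons b t ih => intro g x r h; exact ih _ _ _ (hstep g b x r h)

lemma foldl_getD_upper {β : Type} (step : PySem.Dict Int (List Int) → β → PySem.Dict Int (List Int))
    (Q : β → Int → Int → Prop) :
    ∀ (l : List β), (∀ g b, b ∈ l → ∀ x r, x ∈ (step g b).getD r [] → x ∈ g.getD r [] ∨ Q b r x) →
    ∀ (g : PySem.Dict Int (List Int)) (x r : Int),
      x ∈ (l.foldl step g).getD r [] → x ∈ g.getD r [] ∨ ∃ b ∈ l, Q b r x := by
  intro l
  induction l with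
  | nil => intro _ g x r h; exact Or.inl (by simpa using h)
  | cons b t ih =>
    intro hstep g x r h
    rcases ih (fun g b hb => hstep g b (by simp [hb])) _ _ _ h with h2 | ⟨b', hb', hq⟩
    · rcases hstep g b (by simp) x r h2 with h3 | hq
      · exact Or.inl h3
      · exact Or.inr ⟨b, by simp, hq⟩
    · exact Or.inr ⟨b', by simp [hb'], hq⟩

lemma modify_append_mem_mono {g : PySem.Dict Int (List Int)} {k v x r : Int}
    (h : x ∈ g.getD r []) : x ∈ (g.modify k [] (fun l => l ++ [v])).getD r [] := by
  rw [PySem.Dict.getD_modify]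
  split
  · next heq => subst heq; exact List.mem_append.mpr (Or.inl h)
  · exact h

lemma modify2_mem {g : PySem.Dict Int (List Int)} {r1 r2 x r : Int}
    (h : x ∈ ((g.modify r1 [] (fun l => l ++ [r2])).modify r2 [] (fun l => l ++ [r1])).getD r []) :
    x ∈ g.getD r [] ∨ ((r = r1 ∨ r = r2) ∧ (x = r1 ∨ x = r2)) := by
  rw [PySem.Dict.getD_modify] at h
  by_cases h2 : r = r2
  · rw [if_pos h2, PySem.Dict.getD_modify] at h
    rcases List.mem_append.mp h with h3 | h3
    · by_cases h1 : r2 = r1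
      · rw [if_pos h1] at h3
        rcases List.mem_append.mp h3 with h4 | h4
        · exact Or.inl (by rw [h2, h1]; exact h4)
        · exact Or.inr ⟨Or.inr h2, Or.inr (by simpa using h4)⟩
      · rw [if_neg h1] at h3; exact Or.inl (h2 ▸ h3)
    · exact Or.inr ⟨Or.inr h2, Or.inl (by simpa using h3)⟩
  · rw [if_neg h2, PySem.Dict.getD_modify] at h
    by_cases h1 : r = r1
    · rw [if_pos h1] at h
      rcases List.mem_append.mp h with h3 | h3
      · exact Or.inl (h1 ▸ h3)
      · exact Or.inr ⟨Or.inl h1, Or.inr (by simpa using h3)⟩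
    · rw [if_neg h1] at h; exact Or.inl h

def pvJStep (rl : List Int) (i : Int) (g : PySem.Dict Int (List Int)) (j : Int) :
    PySem.Dict Int (List Int) :=
  (g.modify (PySem.List.pyGetD rl i 0) [] (fun l => l ++ [PySem.List.pyGetD rl j 0])).modify
    (PySem.List.pyGetD rl j 0) [] (fun l => l ++ [PySem.List.pyGetD rl i 0])

def pvIStep (rl : List Int) (g : PySem.Dict Int (List Int)) (i : Int) :
    PySem.Dict Int (List Int) :=
  (PySem.List.pyRange (i+1) (rl.length : Int) 1).foldl (pvJStep rl i) g

lemma pvGraphA_eq (idx : PySem.Dict Int (List Int)) :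
    pvGraphA idx = idx.items.foldl (fun g p =>
      (PySem.List.pyRange 0 (p.2.length : Int) 1).foldl (pvIStep p.2) g) PySem.Dict.empty := rfl

lemma jstep_mono {rl : List Int} {i : Int} {g : PySem.Dict Int (List Int)} {j x r : Int}
    (h : x ∈ g.getD r []) : x ∈ (pvJStep rl i g j).getD r [] :=
  modify_append_mem_mono (modify_append_mem_mono h)

lemma istep_mono {rl : List Int} {g : PySem.Dict Int (List Int)} {i x r : Int}
    (h : x ∈ g.getD r []) : x ∈ (pvIStep rl g i).getD r [] :=
  foldl_getD_mono _ (fun g b x r h => jstep_mono h) _ _ _ _ h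

lemma pyGetD_mem_of_range {rl : List Int} {i : Int} (h0 : 0 ≤ i) (h1 : i < (rl.length : Int)) :
    PySem.List.pyGetD rl i 0 ∈ rl := by
  rw [PySem.List.pyGetD_eq_getElem rl 0 h0 h1]
  exact List.getElem_mem _

lemma graph_upper (routes : List (List Int)) (r x : Int)
    (h : x ∈ (pvGraphA (pvIndexA routes)).getD r []) :
    ∃ stop, r ∈ pvIdxG routes stop ∧ x ∈ pvIdxG routes stop := by
  rw [pvGraphA_eq] at h
  have hstepj : ∀ (rl : List Int) (i : Int), 0 ≤ i → i < (rl.length : Int) →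
      ∀ g (j : Int), j ∈ PySem.List.pyRange (i+1) (rl.length : Int) 1 → ∀ x r,
      x ∈ (pvJStep rl i g j).getD r [] → x ∈ g.getD r [] ∨ (r ∈ rl ∧ x ∈ rl) := by
    intro rl i hi0 hi1 g j hj x r hmem3
    rw [PySem.List.mem_pyRange_one] at hj
    have ha := pyGetD_mem_of_range (rl := rl) hi0 hi1
    have hb := pyGetD_mem_of_range (rl := rl) (by omega : (0:Int) ≤ j) hj.2
    rcases modify2_mem hmem3 with h0 | ⟨hr1, hx1⟩
    · exact Or.inl h0
    · refine Or.inr ⟨?_, ?_⟩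
      · rcases hr1 with h | h <;> rw [h] <;> assumption
      · rcases hx1 with h | h <;> rw [h] <;> assumption
  have hstepi : ∀ (rl : List Int) g (i : Int), i ∈ PySem.List.pyRange 0 (rl.length : Int) 1 →
      ∀ x r, x ∈ (pvIStep rl g i).getD r [] → x ∈ g.getD r [] ∨ (r ∈ rl ∧ x ∈ rl) := by
    intro rl g i hi x r hmem2
    rw [PySem.List.mem_pyRange_one] at hi
    rcases foldl_getD_upper (pvJStep rl i) (fun (j : Int) r x => r ∈ rl ∧ x ∈ rl) _
      (hstepj rl i hi.1 hi.2) g x r hmem2 with h0 | ⟨j, hj, hq⟩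
    · exact Or.inl h0
    · exact Or.inr hq
  have hstep : ∀ g (p : Int × List Int), p ∈ (pvIndexA routes).items → ∀ x r,
      x ∈ ((PySem.List.pyRange 0 (p.2.length : Int) 1).foldl (pvIStep p.2) g).getD r [] →
      x ∈ g.getD r [] ∨ (r ∈ p.2 ∧ x ∈ p.2) := by
    intro g p _ x r hmem
    rcases foldl_getD_upper (pvIStep p.2) (fun (i : Int) r x => r ∈ p.2 ∧ x ∈ p.2) _
      (fun g i hi => hstepi p.2 g i hi) g x r hmem with h0 | ⟨i, hi, hq⟩
    · exact Or.inl h0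
    · exact Or.inr hq
  rcases foldl_getD_upper _ (fun (p : Int × List Int) r x => r ∈ p.2 ∧ x ∈ p.2)
      ((pvIndexA routes).items) hstep _ x r h with h0 | ⟨p, hp, hr2, hx2⟩
  · simp [PySem.Dict.getD_empty] at h0
  · have hpe : (p.1, p.2) ∈ (pvIndexA routes).items := by simpa using hp
    have hg : (pvIndexA routes).getD p.1 [] = p.2 :=
      PySem.Dict.getD_of_mem_items (d := pvIndexA routes) hpe (nodup_keys_idx routes) []
    exact ⟨p.1, by unfold pvIdxG; rw [hg]; exact hr2, by unfold pvIdxG; rw [hg]; exact hx2⟩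

lemma getD_pyGetD_nat (rl : List Int) (k : Nat) (hk : k < rl.length) :
    PySem.List.pyGetD rl (k : Int) 0 = rl[k] := by
  rw [PySem.List.pyGetD_natCast, List.getD_eq_getElem?_getD, List.getElem?_eq_getElem hk]
  rfl

lemma pair_cover (rl : List Int) (i j : Nat) (hij : i < j) (hj : j < rl.length)
    (a b : Int) (ha : a = rl[i]'(by omega)) (hb : b = rl[j]'hj) (hne : a ≠ b)
    (g : PySem.Dict Int (List Int)) :
    b ∈ ((PySem.List.pyRange 0 (rl.length : Int) 1).foldl (pvIStep rl) g).getD a []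
    ∧ a ∈ ((PySem.List.pyRange 0 (rl.length : Int) 1).foldl (pvIStep rl) g).getD b [] := by
  subst ha
  subst hb
  have hi : i < rl.length := by omega
  rw [PySem.List.pyRange_one_append 0 (i : Int) (rl.length : Int) (by positivity)
        (by exact_mod_cast hi.le),
      List.foldl_append,
      PySem.List.pyRange_one_cons (a := (i : Int)) (b := (rl.length : Int))
        (by exact_mod_cast hi), List.foldl_cons]
  have key : ∀ (g'' : PySem.Dict Int (List Int)),
      rl[j]'hj ∈ (pvJStep rl (i : Int) g'' (j : Int)).getD (rl[i]'hi) []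
      ∧ rl[i]'hi ∈ (pvJStep rl (i : Int) g'' (j : Int)).getD (rl[j]'hj) [] := by
    intro g''
    unfold pvJStep
    rw [getD_pyGetD_nat rl i hi, getD_pyGetD_nat rl j hj]
    constructor
    · rw [PySem.Dict.getD_modify, if_neg hne, PySem.Dict.getD_modify_self]
      simp
    · rw [PySem.Dict.getD_modify_self]
      simp
  have step2 : rl[j]'hj ∈ (pvIStep rl (List.foldl (pvIStep rl) g
        (PySem.List.pyRange 0 (i : Int) 1)) (i : Int)).getD (rl[i]'hi) []
      ∧ rl[i]'hi ∈ (pvIStep rl (List.foldl (pvIStep rl) g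
        (PySem.List.pyRange 0 (i : Int) 1)) (i : Int)).getD (rl[j]'hj) [] := by
    unfold pvIStep
    rw [PySem.List.pyRange_one_append ((i : Int) + 1) (j : Int) (rl.length : Int)
          (by exact_mod_cast hij) (by exact_mod_cast hj.le),
        List.foldl_append,
        PySem.List.pyRange_one_cons (a := (j : Int)) (b := (rl.length : Int))
          (by exact_mod_cast hj), List.foldl_cons]
    constructor
    · exact foldl_getD_mono _ (fun g b x r h => jstep_mono h) _ _ _ _ (key _).1
    · exact foldl_getD_mono _ (fun g b x r h => jstep_mono h) _ _ _ _ (key _).2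
  constructor
  · exact foldl_getD_mono _ (fun g b x r h => istep_mono h) _ _ _ _ step2.1
  · exact foldl_getD_mono _ (fun g b x r h => istep_mono h) _ _ _ _ step2.2

lemma graph_lower (routes : List (List Int)) (stop r x : Int)
    (hr : r ∈ pvIdxG routes stop) (hx : x ∈ pvIdxG routes stop) (hne : r ≠ x) :
    x ∈ (pvGraphA (pvIndexA routes)).getD r [] := by
  have hcont : (pvIndexA routes).contains stop = true := by
    by_contra hc
    rw [Bool.not_eq_true] at hc
    have := PySem.Dict.getD_of_not_contains (pvIndexA routes) ([] : List Int) hc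
    unfold pvIdxG at hr
    rw [this] at hr
    simp at hr
  have hv : (pvIndexA routes).getD stop [] = pvIdxG routes stop := rfl
  have hget : (pvIndexA routes).get? stop = some (pvIdxG routes stop) := by
    have h1 := PySem.Dict.contains_eq_isSome_get? (pvIndexA routes) stop
    rw [hcont] at h1
    obtain ⟨v, hv2⟩ := Option.isSome_iff_exists.mp h1.symm
    rw [hv2]
    congr 1
    have := PySem.Dict.getD_eq_get?_getD (pvIndexA routes) stop ([] : List Int)
    rw [hv2] at this
    simpa [pvIdxG] using this.symm
  have hmemit : (stop, pvIdxG routes stop) ∈ (pvIndexA routes).items :=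
    (PySem.Dict.get?_eq_some_iff_mem_items _ _ _ (nodup_keys_idx routes)).mp hget
  obtain ⟨l1, l2, hsplit⟩ := List.append_of_mem hmemit
  rw [pvGraphA_eq, hsplit, List.foldl_append, List.foldl_cons]
  apply foldl_getD_mono _ (fun g b x r h => foldl_getD_mono _ (fun g b x r h => istep_mono h) _ _ _ _ h)
  set rl := pvIdxG routes stop with hrl
  obtain ⟨ki, hki, hkiv⟩ := List.mem_iff_getElem.mp hr
  obtain ⟨kj, hkj, hkjv⟩ := List.mem_iff_getElem.mp hx
  have hne2 : ki ≠ kj := by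
    intro hh
    apply hne
    rw [← hkiv, ← hkjv]
    subst hh
    rfl
  rcases Nat.lt_or_ge ki kj with hlt | hge
  · exact (pair_cover rl ki kj hlt hkj r x hkiv.symm hkjv.symm hne _).1
  · have hlt2 : kj < ki := by omega
    exact (pair_cover rl kj ki hlt2 hki x r hkjv.symm hkiv.symm (fun hh => hne hh.symm) _).2

-- ---- pvS bookkeeping ----
lemma pvS_add_le (graph : PySem.Dict Int (List Int)) (V : PySem.Set Int) (r : Int)
    (hnd : graph.keys.Nodup) (hr : r ∉ V) :
    (graph.getD r []).length + pvS graph (PySem.Set.add V r) ≤ pvS graph V := by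
  by_cases hc : graph.contains r = true
  · have h1 := PySem.Dict.contains_eq_isSome_get? graph r
    rw [hc] at h1
    obtain ⟨v, hv⟩ := Option.isSome_iff_exists.mp h1.symm
    have hgd : graph.getD r [] = v := by
      have := PySem.Dict.getD_eq_get?_getD graph r ([] : List Int)
      rw [hv] at this
      simpa using this
    have hmem : (r, v) ∈ graph.items :=
      (PySem.Dict.get?_eq_some_iff_mem_items _ _ _ hnd).mp hv
    obtain ⟨l1, l2, hsplit⟩ := List.append_of_mem hmem
    have hkeys : graph.keys = l1.map Prod.fst ++ r :: l2.map Prod.fst := by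
      simp only [PySem.Dict.keys, hsplit, List.map_append, List.map_cons]
    have hnotr : ∀ p ∈ l1 ++ l2, ¬(p : Int × List Int).1 = r := by
      intro p hp
      rw [hkeys] at hnd
      have h2 := (List.nodup_append.mp hnd)
      rcases List.mem_append.mp hp with hp1 | hp2
      · intro he
        exact (h2.2.2 p.1 (List.mem_map_of_mem hp1) r (by simp)) he
      · intro he
        have h3 := List.nodup_cons.mp h2.2.1
        exact h3.1 (he ▸ List.mem_map_of_mem hp2)
    have hfc : ∀ (W : PySem.Set Int) (l : List (Int × List Int)), (∀ p ∈ l, ¬(p : Int × List Int).1 = r) →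
        l.filter (fun p => !(PySem.Set.contains (PySem.Set.add V r) p.1))
          = l.filter (fun p => !(PySem.Set.contains V p.1)) := by
      intro W l hl
      apply List.filter_congr
      intro p hp
      have hpr := hl p hp
      have : (PySem.Set.contains (PySem.Set.add V r) p.1) = (PySem.Set.contains V p.1) := by
        by_cases hm : p.1 ∈ V
        · rw [(PySem.Set.contains_iff _ _).mpr hm,
              (PySem.Set.contains_iff _ _).mpr ((PySem.Set.mem_add V r p.1).mpr (Or.inl hm))]
        · have h3 : p.1 ∉ PySem.Set.add V r := by
            rw [PySem.Set.mem_add]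
            push_neg
            exact ⟨hm, hpr⟩
          rw [Bool.eq_false_iff.mpr (fun hx => hm ((PySem.Set.contains_iff _ _).mp hx)),
              Bool.eq_false_iff.mpr (fun hx => h3 ((PySem.Set.contains_iff _ _).mp hx))]
      rw [this]
    unfold pvS
    rw [hsplit, hgd]
    have hl1 := hfc V l1 (fun p hp => hnotr p (List.mem_append.mpr (Or.inl hp)))
    have hl2 := hfc V l2 (fun p hp => hnotr p (List.mem_append.mpr (Or.inr hp)))
    have hcr : PySem.Set.contains V r = false :=
      Bool.eq_false_iff.mpr (fun hx => hr ((PySem.Set.contains_iff _ _).mp hx))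
    have hcr2 : PySem.Set.contains (PySem.Set.add V r) r = true :=
      (PySem.Set.contains_iff _ _).mpr ((PySem.Set.mem_add V r r).mpr (Or.inr rfl))
    simp only [List.filter_append, List.filter_cons, hcr, hcr2, hl1, hl2, Bool.not_true,
      Bool.not_false, if_true, if_false, Bool.false_eq_true,
      List.map_append, List.sum_append, List.map_cons, List.sum_cons]
    omega
  · have hgd : graph.getD r [] = [] :=
      PySem.Dict.getD_of_not_contains graph ([] : List Int) (Bool.not_eq_true _ ▸ (by simpa using hc))
    have hnotr : ∀ p ∈ graph.items, ¬(p : Int × List Int).1 = r := by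
      intro p hp he
      have : r ∈ graph.keys := by
        rw [← he]
        exact PySem.Dict.mem_keys_of_mem_items _ hp
      exact hc ((PySem.Dict.contains_iff_mem_keys _ _).mpr this)
    unfold pvS
    have : graph.items.filter (fun p => !(PySem.Set.contains (PySem.Set.add V r) p.1))
        = graph.items.filter (fun p => !(PySem.Set.contains V p.1)) := by
      apply List.filter_congr
      intro p hp
      have hpr := hnotr p hp
      by_cases hm : p.1 ∈ V
      · rw [(PySem.Set.contains_iff _ _).mpr hm,
            (PySem.Set.contains_iff _ _).mpr ((PySem.Set.mem_add V r p.1).mpr (Or.inl hm))]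
      · have h3 : p.1 ∉ PySem.Set.add V r := by
          rw [PySem.Set.mem_add]
          push_neg
          exact ⟨hm, hpr⟩
        rw [Bool.eq_false_iff.mpr (fun hx => hm ((PySem.Set.contains_iff _ _).mp hx)),
            Bool.eq_false_iff.mpr (fun hx => h3 ((PySem.Set.contains_iff _ _).mp hx))]
    rw [this, hgd]
    simp

lemma contains_congr {S T : PySem.Set Int} {x : Int} (h : x ∈ S ↔ x ∈ T) :
    PySem.Set.contains S x = PySem.Set.contains T x := by
  by_cases hm : x ∈ T
  · rw [(PySem.Set.contains_iff _ _).mpr (h.mpr hm), (PySem.Set.contains_iff _ _).mpr hm]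
  · rw [Bool.eq_false_iff.mpr (fun hx => hm (h.mp ((PySem.Set.contains_iff _ _).mp hx))),
        Bool.eq_false_iff.mpr (fun hx => hm ((PySem.Set.contains_iff _ _).mp hx))]

lemma not_mem_of_contains_false {S : PySem.Set Int} {x : Int}
    (h : PySem.Set.contains S x = false) : x ∉ S :=
  fun hm => by rw [(PySem.Set.contains_iff _ _).mpr hm] at h; exact Bool.true_eq_false ▸ (by simp at h)

lemma contains_add_of_ne {V : PySem.Set Int} {r x : Int} (h : x ≠ r) :
    PySem.Set.contains (PySem.Set.add V r) x = PySem.Set.contains V x :=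
  contains_congr (by rw [PySem.Set.mem_add]; exact ⟨fun hh => hh.resolve_right h, Or.inl⟩)

-- ---- A-side level processing ----
lemma levelA (routes : List (List Int)) (graph : PySem.Dict Int (List Int)) (target : Int) :
    ∀ (P : List Int) (f : Nat) (V : PySem.Set Int) (Q : List Int) (t : Int),
    pvLoopA routes graph target (P.length + f) V
        (P.map (fun r => (r, t)) ++ Q.map (fun r => (r, t+1)))
      = if P.any (fun r => !(PySem.Set.contains V r) && pvHit routes target r) then t
        else pvLoopA routes graph target f (P.foldl (pvStepA graph) (V, Q)).1
              ((P.foldl (pvStepA graph) (V, Q)).2.map (fun r => (r, t+1))) := by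
  intro P
  induction P with
  | nil =>
    intro f V Q t
    simp [pvStepA]
  | cons r rs ih =>
    intro f V Q t
    have hlen : (r :: rs).length + f = (rs.length + f) + 1 := by simp [List.length_cons]; omega
    rw [hlen]
    simp only [List.map_cons, List.cons_append]
    rw [pvLoopA]
    by_cases hc : PySem.Set.contains V r = true
    · rw [if_pos hc, ih f V Q t]
      simp only [List.any_cons, hc, Bool.not_true, Bool.false_and, Bool.false_or,
        List.foldl_cons, pvStepA, if_pos hc]
      simp
    · rw [Bool.not_eq_true] at hc
      rw [if_neg (by simpa using not_mem_of_contains_false hc)]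
      by_cases hh : ((PySem.List.pyGet? routes r).getD []).contains target = true
      · rw [if_pos hh]
        have hcond : (r :: rs).any (fun r => !(PySem.Set.contains V r) && pvHit routes target r) = true := by
          simp only [List.any_cons, Bool.or_eq_true, Bool.and_eq_true]
          exact Or.inl ⟨by simpa using not_mem_of_contains_false hc, by simpa [pvHit, pvRt] using hh⟩

        rw [hcond]
        simp
      · rw [if_neg hh]
        rw [List.append_assoc, ← List.map_append]
        rw [ih f (PySem.Set.add V r) (Q ++ (graph.getD r []).filter
              (fun n => !(PySem.Set.contains (PySem.Set.add V r) n))) t]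
        have hcond : rs.any (fun r' => !(PySem.Set.contains (PySem.Set.add V r) r')
              && pvHit routes target r')
            = (r :: rs).any (fun r' => !(PySem.Set.contains V r') && pvHit routes target r') := by
          simp only [List.any_cons, hc, Bool.not_false, Bool.true_and]
          have hhit : pvHit routes target r = false := by simpa [pvHit, pvRt] using hh
          rw [hhit, Bool.false_or]
          apply List.any_congr rfl
          intro a
          by_cases ha : a = r
          · subst ha
            rw [hhit, Bool.and_false, Bool.and_false]
          · rw [contains_add_of_ne ha]
        rw [hcond]
        simp only [List.foldl_cons, pvStepA, hc]
        simp

lemma foldA_V_mem (graph : PySem.Dict Int (List Int)) :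
    ∀ (P : List Int) (V : PySem.Set Int) (out : List Int) (x : Int),
    (x ∈ (P.foldl (pvStepA graph) (V, out)).1 ↔ x ∈ V ∨ x ∈ P) := by
  intro P
  induction P with
  | nil => intro V out x; simp
  | cons r rs ih =>
    intro V out x
    simp only [List.foldl_cons, pvStepA]
    by_cases hc : PySem.Set.contains V r = true
    · rw [if_pos hc]
      rw [ih]
      have hrV : r ∈ V := (PySem.Set.contains_iff _ _).mp hc
      constructor
      · rintro (h | h)
        · exact Or.inl h
        · exact Or.inr (by simp [h])
      · rintro (h | h)
        · exact Or.inl h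
        · rcases List.mem_cons.mp h with h2 | h2
          · exact Or.inl (h2 ▸ hrV)
          · exact Or.inr h2
    · rw [if_neg hc]
      rw [ih]
      rw [PySem.Set.mem_add]
      constructor
      · rintro ((h | h) | h)
        · exact Or.inl h
        · exact Or.inr (by simp [h])
        · exact Or.inr (by simp [h])
      · rintro (h | h)
        · exact Or.inl (Or.inl h)
        · rcases List.mem_cons.mp h with h2 | h2
          · exact Or.inl (Or.inr h2)
          · exact Or.inr h2

lemma foldA_out_upper (graph : PySem.Dict Int (List Int)) :
    ∀ (P : List Int) (V : PySem.Set Int) (out : List Int) (x : Int),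
    x ∈ (P.foldl (pvStepA graph) (V, out)).2 →
      x ∈ out ∨ ((∃ r ∈ P, r ∉ V ∧ x ∈ graph.getD r []) ∧ x ∉ V) := by
  intro P
  induction P with
  | nil => intro V out x h; exact Or.inl (by simpa using h)
  | cons r rs ih =>
    intro V out x h
    simp only [List.foldl_cons, pvStepA] at h
    by_cases hc : PySem.Set.contains V r = true
    · rw [if_pos hc] at h
      rcases ih _ _ _ h with h1 | ⟨⟨r', hr', hnv, hh⟩, hxV⟩
      · exact Or.inl h1
      · exact Or.inr ⟨⟨r', by simp [hr'], hnv, hh⟩, hxV⟩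
    · rw [if_neg hc] at h
      rcases ih _ _ _ h with h1 | ⟨⟨r', hr', hnv, hh⟩, hxV⟩
      · rcases List.mem_append.mp h1 with h2 | h2
        · exact Or.inl h2
        · have h3 := List.mem_filter.mp h2
          have hxadd : x ∉ PySem.Set.add V r :=
            not_mem_of_contains_false (by simpa using h3.2)
          have hxV : x ∉ V := fun hm => hxadd ((PySem.Set.mem_add V r x).mpr (Or.inl hm))
          exact Or.inr ⟨⟨r, by simp, not_mem_of_contains_false (by simpa using hc), h3.1⟩, hxV⟩
      · have hr'V : r' ∉ V := fun hm => hnv ((PySem.Set.mem_add V r r').mpr (Or.inl hm))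
        have hxV2 : x ∉ V := fun hm => hxV ((PySem.Set.mem_add V r x).mpr (Or.inl hm))
        exact Or.inr ⟨⟨r', by simp [hr'], hr'V, hh⟩, hxV2⟩

lemma foldA_out_lower (graph : PySem.Dict Int (List Int)) :
    ∀ (P : List Int) (V : PySem.Set Int) (out : List Int) (x : Int),
    (x ∈ out ∨ (x ∉ V ∧ x ∉ P ∧ ∃ r ∈ P, r ∉ V ∧ x ∈ graph.getD r [])) →
    x ∈ (P.foldl (pvStepA graph) (V, out)).2 := by
  intro P
  induction P with
  | nil =>
    intro V out x h
    rcases h with h | ⟨_, _, r, hr, _⟩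
    · simpa using h
    · simp at hr
  | cons r rs ih =>
    intro V out x h
    simp only [List.foldl_cons, pvStepA]
    by_cases hc : PySem.Set.contains V r = true
    · rw [if_pos hc]
      apply ih
      rcases h with h | ⟨hxV, hxP, r', hr', hnv, hh⟩
      · exact Or.inl h
      · refine Or.inr ⟨hxV, fun hm => hxP (by simp [hm]), r', ?_, hnv, hh⟩
        rcases List.mem_cons.mp hr' with h2 | h2
        · exact absurd ((PySem.Set.contains_iff _ _).mp (h2 ▸ hc)) hnv
        · exact h2
    · rw [if_neg hc]
      rcases h with h | ⟨hxV, hxP, r', hr', hnv, hh⟩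
      · exact ih _ _ _ (Or.inl (List.mem_append.mpr (Or.inl h)))
      · have hxr : x ≠ r := fun he => hxP (by simp [he])
        by_cases hrr : r' = r
        · subst hrr
          apply ih
          apply Or.inl
          apply List.mem_append.mpr
          apply Or.inr
          apply List.mem_filter.mpr
          refine ⟨hh, ?_⟩
          have : x ∉ PySem.Set.add V r' := by
            rw [PySem.Set.mem_add]
            rintro (hm | hm)
            · exact hxV hm
            · exact hxr hm
          simpa using Bool.eq_false_iff.mpr (fun hx => this ((PySem.Set.contains_iff _ _).mp hx))
        · apply ih
          refine Or.inr ⟨?_, fun hm => hxP (by simp [hm]), r', ?_, ?_, hh⟩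
          · rw [PySem.Set.mem_add]
            rintro (hm | hm)
            · exact hxV hm
            · exact hxr hm
          · rcases List.mem_cons.mp hr' with h2 | h2
            · exact absurd h2 hrr
            · exact h2
          · rw [PySem.Set.mem_add]
            rintro (hm | hm)
            · exact hnv hm
            · exact hrr hm

lemma foldA_fuel (graph : PySem.Dict Int (List Int)) (hnd : graph.keys.Nodup) :
    ∀ (P : List Int) (V : PySem.Set Int) (out : List Int),
    (P.foldl (pvStepA graph) (V, out)).2.length + pvS graph (P.foldl (pvStepA graph) (V, out)).1
      ≤ out.length + pvS graph V := by
  intro P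
  induction P with
  | nil => intro V out; simp
  | cons r rs ih =>
    intro V out
    simp only [List.foldl_cons, pvStepA]
    by_cases hc : PySem.Set.contains V r = true
    · rw [if_pos hc]
      exact ih V out
    · rw [if_neg hc]
      have h1 := ih (PySem.Set.add V r)
        (out ++ (graph.getD r []).filter (fun n => !(PySem.Set.contains (PySem.Set.add V r) n)))
      have h2 : (out ++ (graph.getD r []).filter
            (fun n => !(PySem.Set.contains (PySem.Set.add V r) n))).length
          ≤ out.length + (graph.getD r []).length := by
        rw [List.length_append]
        have := List.length_filter_le (fun n => !(PySem.Set.contains (PySem.Set.add V r) n))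
          (graph.getD r [])
        omega
      have h3 := pvS_add_le graph V r hnd (not_mem_of_contains_false (by simpa using hc))
      omega

-- ---- B-side level processing ----
lemma addFold_spec : ∀ (ys : List Int) (s : PySem.Set Int) (n : List Int),
    ∃ δ, ys.foldl (fun acc r2 => if PySem.Set.contains acc.1 r2 then acc
            else (PySem.Set.add acc.1 r2, acc.2 ++ [r2])) (s, n) = (s ++ δ, n ++ δ)
      ∧ δ.Nodup ∧ ∀ x, (x ∈ δ ↔ x ∈ ys ∧ x ∉ s) := by
  intro ys
  induction ys with
  | nil => intro s n; exact ⟨[], by simp, by simp, by simp⟩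
  | cons y t ih =>
    intro s n
    simp only [List.foldl_cons]
    by_cases hc : PySem.Set.contains s y = true
    · rw [if_pos hc]
      obtain ⟨δ, he, hnd, hm⟩ := ih s n
      refine ⟨δ, he, hnd, fun x => ?_⟩
      rw [hm x]
      have hy : y ∈ s := (PySem.Set.contains_iff _ _).mp hc
      constructor
      · rintro ⟨hx, hxs⟩
        exact ⟨by simp [hx], hxs⟩
      · rintro ⟨hx, hxs⟩
        rcases List.mem_cons.mp hx with h2 | h2
        · exact absurd (h2 ▸ hy) hxs
        · exact ⟨h2, hxs⟩
    · rw [if_neg hc]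
      rw [Bool.not_eq_true] at hc
      have hys : y ∉ s := not_mem_of_contains_false hc
      have hadd : PySem.Set.add s y = s ++ [y] := PySem.Set.add_of_not_mem hys
      rw [hadd]
      obtain ⟨δ, he, hnd, hm⟩ := ih (s ++ [y]) (n ++ [y])
      refine ⟨y :: δ, ?_, ?_, fun x => ?_⟩
      · rw [he]
        simp [List.append_assoc]
      · refine List.nodup_cons.mpr ⟨fun hy2 => ?_, hnd⟩
        have := (hm y).mp hy2
        exact this.2 (by simp)
      · constructor
        · rintro hx
          rcases List.mem_cons.mp hx with h2 | h2
          · exact ⟨by simp [h2], h2 ▸ hys⟩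
          · have := (hm x).mp h2
            exact ⟨by simp [this.1], fun hm2 => this.2 (by simp [hm2])⟩
        · rintro ⟨hx, hxs⟩
          rcases List.mem_cons.mp hx with h2 | h2
          · exact List.mem_cons.mpr (Or.inl h2)
          · by_cases hxy : x = y
            · exact List.mem_cons.mpr (Or.inl hxy)
            · refine List.mem_cons.mpr (Or.inr ((hm x).mpr ⟨h2, ?_⟩))
              rw [List.mem_append]
              rintro (hm2 | hm2)
              · exact hxs hm2
              · exact hxy (by simpa using hm2)

lemma expandB_spec (routes : List (List Int)) (r : Int) :
    ∀ (stops : List Int) (seen : PySem.Set Int) (nxt : List Int),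
    ∃ δ, stops.foldl (fun acc stop => ((pvIndexA routes).getD stop []).foldl
            (fun acc r2 => if PySem.Set.contains acc.1 r2 then acc
              else (PySem.Set.add acc.1 r2, acc.2 ++ [r2])) acc) (seen, nxt) = (seen ++ δ, nxt ++ δ)
      ∧ δ.Nodup ∧ ∀ x, (x ∈ δ ↔ (∃ stop ∈ stops, x ∈ pvIdxG routes stop) ∧ x ∉ seen) := by
  intro stops
  induction stops with
  | nil => intro seen nxt; exact ⟨[], by simp, by simp, by simp⟩
  | cons stop rest ih =>
    intro seen nxt
    simp only [List.foldl_cons]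
    obtain ⟨δ1, he1, hnd1, hm1⟩ := addFold_spec ((pvIndexA routes).getD stop []) seen nxt
    rw [he1]
    obtain ⟨δ2, he2, hnd2, hm2⟩ := ih (seen ++ δ1) (nxt ++ δ1)
    refine ⟨δ1 ++ δ2, ?_, ?_, fun x => ?_⟩
    · rw [he2]
      simp [List.append_assoc]
    · rw [List.nodup_append]
      refine ⟨hnd1, hnd2, fun a ha b hb => ?_⟩
      intro he
      have := (hm2 b).mp hb
      exact this.2 (List.mem_append.mpr (Or.inr (he ▸ ha)))
    · constructor
      · intro hx
        rcases List.mem_append.mp hx with h2 | h2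
        · have := (hm1 x).mp h2
          exact ⟨⟨stop, by simp, by simpa [pvIdxG] using this.1⟩, this.2⟩
        · have := (hm2 x).mp h2
          obtain ⟨⟨st, hst, hin⟩, hns⟩ := this
          exact ⟨⟨st, by simp [hst], hin⟩, fun hm3 => hns (List.mem_append.mpr (Or.inl hm3))⟩
      · rintro ⟨⟨st, hst, hin⟩, hns⟩
        by_cases h1 : x ∈ δ1
        · exact List.mem_append.mpr (Or.inl h1)
        · refine List.mem_append.mpr (Or.inr ((hm2 x).mpr ⟨⟨st, ?_, hin⟩, ?_⟩))
          · rcases List.mem_cons.mp hst with h2 | h2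
            · exfalso
              apply h1
              apply (hm1 x).mpr
              exact ⟨by simpa [pvIdxG] using (h2 ▸ hin), hns⟩
            · exact h2
          · rw [List.mem_append]
            rintro (hm3 | hm3)
            · exact hns hm3
            · exact h1 hm3

lemma levelB_fold_spec (routes : List (List Int)) :
    ∀ (F : List Int) (seen : PySem.Set Int) (nxt : List Int),
    ∃ Δ, F.foldl (pvExpandB routes (pvIndexA routes)) (seen, nxt) = (seen ++ Δ, nxt ++ Δ)
      ∧ Δ.Nodup ∧ ∀ x, (x ∈ Δ ↔ (∃ r ∈ F, pvBN routes r x) ∧ x ∉ seen) := by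
  intro F
  induction F with
  | nil => intro seen nxt; exact ⟨[], by simp, by simp, by simp⟩
  | cons r rest ih =>
    intro seen nxt
    simp only [List.foldl_cons]
    obtain ⟨δ1, he1, hnd1, hm1⟩ := expandB_spec routes r (pvRt routes r) seen nxt
    have hexp : pvExpandB routes (pvIndexA routes) (seen, nxt) r = (seen ++ δ1, nxt ++ δ1) := he1
    rw [hexp]
    obtain ⟨δ2, he2, hnd2, hm2⟩ := ih (seen ++ δ1) (nxt ++ δ1)
    refine ⟨δ1 ++ δ2, ?_, ?_, fun x => ?_⟩
    · rw [he2]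
      simp [List.append_assoc]
    · rw [List.nodup_append]
      refine ⟨hnd1, hnd2, fun a ha b hb => ?_⟩
      intro he
      have := (hm2 b).mp hb
      exact this.2 (List.mem_append.mpr (Or.inr (he ▸ ha)))
    · constructor
      · intro hx
        rcases List.mem_append.mp hx with h2 | h2
        · have := (hm1 x).mp h2
          exact ⟨⟨r, by simp, this.1⟩, this.2⟩
        · have := (hm2 x).mp h2
          obtain ⟨⟨r', hr', hbn⟩, hns⟩ := this
          exact ⟨⟨r', by simp [hr'], hbn⟩, fun hm3 => hns (List.mem_append.mpr (Or.inl hm3))⟩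
      · rintro ⟨⟨r', hr', hbn⟩, hns⟩
        by_cases h1 : x ∈ δ1
        · exact List.mem_append.mpr (Or.inl h1)
        · refine List.mem_append.mpr (Or.inr ((hm2 x).mpr ⟨⟨r', ?_, hbn⟩, ?_⟩))
          · rcases List.mem_cons.mp hr' with h2 | h2
            · exfalso
              exact h1 ((hm1 x).mpr ⟨h2 ▸ hbn, hns⟩)
            · exact h2
          · rw [List.mem_append]
            rintro (hm3 | hm3)
            · exact hns hm3
            · exact h1 hm3

lemma levelB_none (routes : List (List Int)) (idx : PySem.Dict Int (List Int)) (target : Int) :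
    ∀ (F : List Int) (acc : PySem.Set Int × List Int),
    (∃ r ∈ F, pvHit routes target r = true) → pvLevelB routes idx target F acc = none := by
  intro F
  induction F with
  | nil => intro acc h; simp at h
  | cons r rest ih =>
    intro acc h
    rw [pvLevelB]
    by_cases hh : ((PySem.List.pyGet? routes r).getD []).contains target = true
    · rw [if_pos hh]
    · rw [if_neg hh]
      apply ih
      rcases h with ⟨r', hr', hhit⟩
      rcases List.mem_cons.mp hr' with h2 | h2
      · exact absurd (h2 ▸ hhit) (by simpa [pvHit, pvRt] using hh)
      · exact ⟨r', h2, hhit⟩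

lemma levelB_some (routes : List (List Int)) (idx : PySem.Dict Int (List Int)) (target : Int) :
    ∀ (F : List Int) (acc : PySem.Set Int × List Int),
    (∀ r ∈ F, pvHit routes target r = false) →
    pvLevelB routes idx target F acc = some (F.foldl (pvExpandB routes idx) acc) := by
  intro F
  induction F with
  | nil => intro acc h; rfl
  | cons r rest ih =>
    intro acc h
    rw [pvLevelB]
    have hh : ((PySem.List.pyGet? routes r).getD []).contains target = false := by
      simpa [pvHit, pvRt] using h r (by simp)
    rw [if_neg (by rw [hh]; simp)]
    rw [List.foldl_cons]
    exact ih _ (fun r' hr' => h r' (by simp [hr']))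

lemma loopB_noHit (routes : List (List Int)) (idx : PySem.Dict Int (List Int)) (target : Int)
    (h : ∀ r, pvHit routes target r = false) :
    ∀ (f : Nat) (t : Int) (seen : PySem.Set Int) (F : List Int),
    pvLoopB routes idx target f t seen F = -1 := by
  intro f
  induction f with
  | zero => intro t seen F; cases F <;> rfl
  | succ f ih =>
    intro t seen F
    cases F with
    | nil => rfl
    | cons r rs =>
      rw [pvLoopB]
      rw [levelB_some routes idx target (r :: rs) (seen, []) (fun r' _ => h r')]
      exact ih _ _ _

lemma pyGet?_mem {xs : List (List Int)} {i : Int} {l : List Int}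
    (h : PySem.List.pyGet? xs i = some l) : l ∈ xs := by
  unfold PySem.List.pyGet? PySem.List.pyIdx? at h
  split at h
  · rcases Option.bind_eq_some_iff.mp h with ⟨a, _, hb⟩
    exact List.mem_of_getElem? hb
  · rcases Option.bind_eq_some_iff.mp h with ⟨a, _, hb⟩
    exact List.mem_of_getElem? hb

lemma hit_of_true {routes : List (List Int)} {target r : Int}
    (h : pvHit routes target r = true) : ∃ ro ∈ routes, target ∈ ro := by
  unfold pvHit pvRt at h
  cases hg : PySem.List.pyGet? routes r with
  | none => rw [hg] at h; simp at h
  | some l =>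
    rw [hg] at h
    exact ⟨l, pyGet?_mem hg, by simpa using h⟩

lemma loopA_nil (routes : List (List Int)) (graph : PySem.Dict Int (List Int)) (target : Int)
    (f : Nat) (V : PySem.Set Int) : pvLoopA routes graph target f V [] = -1 := by
  cases f <;> rfl

lemma loopB_nil (routes : List (List Int)) (idx : PySem.Dict Int (List Int)) (target : Int)
    (f : Nat) (t : Int) (seen : PySem.Set Int) :
    pvLoopB routes idx target f t seen [] = -1 := by
  cases f <;> rfl

lemma pvS_empty (graph : PySem.Dict Int (List Int)) :
    pvS graph PySem.Set.empty = (graph.values.map List.length).sum := by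
  unfold pvS
  have h1 : graph.items.filter (fun p => !(PySem.Set.contains PySem.Set.empty p.1)) = graph.items := by
    apply List.filter_eq_self.mpr
    intro p _
    have : p.1 ∉ (PySem.Set.empty : PySem.Set Int) := by simp [PySem.Set.empty]
    simp [Bool.eq_false_iff.mpr (fun hx => this ((PySem.Set.contains_iff _ _).mp hx))]
  rw [h1]
  have h2 : graph.values = graph.items.map Prod.snd := rfl
  rw [h2, List.map_map]
  rfl

lemma loopA_stuck (routes : List (List Int)) (graph : PySem.Dict Int (List Int)) (target : Int)
    (P : List Int) (fA : Nat) (V : PySem.Set Int) (t : Int)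
    (hall : ∀ x ∈ P, x ∈ V) (hf : P.length + 1 ≤ fA) :
    pvLoopA routes graph target fA V (P.map (fun r => (r, t))) = -1 := by
  have hq : P.map (fun r => (r, t)) = P.map (fun r => (r, t)) ++ ([] : List Int).map (fun r => (r, t+1)) := by
    simp
  have hfa : fA = P.length + (fA - P.length) := by omega
  rw [hq, hfa, levelA]
  have hcond : P.any (fun r => !(PySem.Set.contains V r) && pvHit routes target r) = false := by
    apply List.any_eq_false.mpr
    intro r hr
    rw [(PySem.Set.contains_iff _ _).mpr (hall r hr)]
    simp
  rw [hcond]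
  have hout : (P.foldl (pvStepA graph) (V, ([] : List Int))).2 = [] := by
    rcases hno : (P.foldl (pvStepA graph) (V, ([] : List Int))).2 with _ | ⟨a, l⟩
    · rfl
    · exfalso
      have hmem : a ∈ (P.foldl (pvStepA graph) (V, ([] : List Int))).2 := by rw [hno]; simp
      rcases foldA_out_upper graph P V [] a hmem with h1 | ⟨⟨r', _, hnv, _⟩, _⟩
      · simp at h1
      · exact hnv (hall r' (by assumption))
  rw [hout]
  simp only [List.map_nil, Bool.false_eq_true, if_false]
  exact loopA_nil _ _ _ _ _

-- ---- the bisimulation ----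
lemma seen_len_le (routes : List (List Int)) (seen : PySem.Set Int)
    (hval : ∀ x ∈ seen, pvVal routes x) (hnd : seen.Nodup) : seen.length ≤ routes.length := by
  have hsub : seen ⊆ PySem.List.pyRange 0 (routes.length : Int) 1 := by
    intro x hx
    rw [PySem.List.mem_pyRange_one]
    exact ⟨(hval x hx).1, (hval x hx).2⟩
  have hle := (List.subperm_of_subset hnd hsub).length_le
  rw [PySem.List.length_pyRange_one] at hle
  omega

lemma bisim (routes : List (List Int)) (target : Int) :
    ∀ (fB fA : Nat) (t : Int) (V : PySem.Set Int) (P : List Int) (seen : PySem.Set Int) (F : List Int),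
    (∀ x, (x ∈ P ∧ x ∉ V) ↔ x ∈ F) →
    (∀ x, x ∈ seen ↔ (x ∈ V ∨ x ∈ P)) →
    (∀ x ∈ seen, pvVal routes x) →
    seen.Nodup →
    P.length + pvS (pvGraphA (pvIndexA routes)) V + 1 ≤ fA →
    (F = [] ∨ routes.length + 1 ≤ fB + seen.length) →
    pvLoopA routes (pvGraphA (pvIndexA routes)) target fA V (P.map (fun r => (r, t)))
      = pvLoopB routes (pvIndexA routes) target fB t seen F := by
  intro fB
  induction fB with
  | zero =>
    intro fA t V P seen F h1 h2 h5 hnd h6 h7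
    rcases h7 with hF | h7
    · subst hF
      rw [loopB_nil]
      apply loopA_stuck routes _ target P fA V t ?_ (by omega)
      intro x hx
      by_contra hxv
      exact (by simpa using (h1 x).mp ⟨hx, hxv⟩ : False)
    · exfalso
      have := seen_len_le routes seen h5 hnd
      omega
  | succ fB ih =>
    intro fA t V P seen F h1 h2 h5 hnd h6 h7
    cases F with
    | nil =>
      rw [loopB_nil]
      apply loopA_stuck routes _ target P fA V t ?_ (by omega)
      intro x hx
      by_contra hxv
      exact (by simpa using (h1 x).mp ⟨hx, hxv⟩ : False)
    | cons r0 rs =>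
      have hq : P.map (fun r => (r, t))
          = P.map (fun r => (r, t)) ++ ([] : List Int).map (fun r => (r, t+1)) := by simp
      have hfa : fA = P.length + (fA - P.length) := by omega
      rw [hq, hfa, levelA]
      rw [pvLoopB]
      by_cases hhit : ∃ r ∈ r0 :: rs, pvHit routes target r = true
      · rw [levelB_none routes _ target _ _ hhit]
        have hcond : P.any (fun r => !(PySem.Set.contains V r) && pvHit routes target r) = true := by
          apply List.any_eq_true.mpr
          obtain ⟨r, hrF, hrhit⟩ := hhit
          obtain ⟨hrP, hrV⟩ := (h1 r).mpr hrF
          refine ⟨r, hrP, ?_⟩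
          rw [Bool.and_eq_true]
          exact ⟨by simpa using hrV, hrhit⟩
        rw [hcond]
        rfl
      · push_neg at hhit
        have hhit' : ∀ r ∈ r0 :: rs, pvHit routes target r = false := fun r hr =>
          Bool.eq_false_iff.mpr (hhit r hr)
        rw [levelB_some routes _ target _ _ hhit']
        obtain ⟨Δ, heΔ, hndΔ, hmΔ⟩ := levelB_fold_spec routes (r0 :: rs) seen []
        have hcondF : P.any (fun r => !(PySem.Set.contains V r) && pvHit routes target r) = false := by
          apply List.any_eq_false.mpr
          intro r hr
          by_cases hv : r ∈ V
          · rw [(PySem.Set.contains_iff _ _).mpr hv]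
            simp
          · rw [hhit' r ((h1 r).mp ⟨hr, hv⟩)]
            simp
        rw [hcondF]
        simp only [Bool.false_eq_true, if_false]
        rw [heΔ]
        have hVmem : ∀ x, x ∈ (P.foldl (pvStepA (pvGraphA (pvIndexA routes))) (V, ([] : List Int))).1
            ↔ x ∈ V ∨ x ∈ P := fun x => foldA_V_mem _ P V [] x
        have hPval : ∀ r ∈ P, pvVal routes r := fun r hr => h5 r ((h2 r).mpr (Or.inr hr))
        have hedge1 : ∀ r x, x ∈ (pvGraphA (pvIndexA routes)).getD r [] → pvBN routes r x := by
          intro r x hx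
          obtain ⟨stop, hr, hx2⟩ := graph_upper routes r x hx
          exact ⟨stop, ((mem_idxG routes stop r).mp hr).2, hx2⟩
        have hedge2 : ∀ r x, r ≠ x → pvBN routes r x → pvVal routes r →
            x ∈ (pvGraphA (pvIndexA routes)).getD r [] := by
          intro r x hne hbn hval
          obtain ⟨stop, hst, hx2⟩ := hbn
          exact graph_lower routes stop r x ((mem_idxG routes stop r).mpr ⟨hval, hst⟩) hx2 hne
        have i1 : ∀ x, (x ∈ (P.foldl (pvStepA (pvGraphA (pvIndexA routes))) (V, ([] : List Int))).2
            ∧ x ∉ (P.foldl (pvStepA (pvGraphA (pvIndexA routes))) (V, ([] : List Int))).1) ↔ x ∈ Δ := by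
          intro x
          constructor
          · rintro ⟨hx2, hx1⟩
            have hxV : x ∉ V := fun hm => hx1 ((hVmem x).mpr (Or.inl hm))
            have hxP : x ∉ P := fun hm => hx1 ((hVmem x).mpr (Or.inr hm))
            rcases foldA_out_upper _ P V [] x hx2 with h0 | ⟨⟨r, hrP, hrV, hedge⟩, _⟩
            · simp at h0
            · apply (hmΔ x).mpr
              refine ⟨⟨r, (h1 r).mp ⟨hrP, hrV⟩, hedge1 r x hedge⟩, ?_⟩
              intro hm
              rcases (h2 x).mp hm with h | h
              · exact hxV h
              · exact hxP h
          · intro hxΔ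
            obtain ⟨⟨r, hrF, hbn⟩, hxs⟩ := (hmΔ x).mp hxΔ
            obtain ⟨hrP, hrV⟩ := (h1 r).mpr hrF
            have hxV : x ∉ V := fun hm => hxs ((h2 x).mpr (Or.inl hm))
            have hxP : x ∉ P := fun hm => hxs ((h2 x).mpr (Or.inr hm))
            have hne : r ≠ x := fun he => hxP (he ▸ hrP)
            have hedge := hedge2 r x hne hbn (hPval r hrP)
            constructor
            · exact foldA_out_lower _ P V [] x (Or.inr ⟨hxV, hxP, r, hrP, hrV, hedge⟩)
            · intro hm
              rcases (hVmem x).mp hm with h | h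
              · exact hxV h
              · exact hxP h
        have i2 : ∀ x, x ∈ seen ++ Δ ↔ x ∈ (P.foldl (pvStepA (pvGraphA (pvIndexA routes))) (V, ([] : List Int))).1
            ∨ x ∈ (P.foldl (pvStepA (pvGraphA (pvIndexA routes))) (V, ([] : List Int))).2 := by
          intro x
          constructor
          · intro hm
            rcases List.mem_append.mp hm with h | h
            · exact Or.inl ((hVmem x).mpr ((h2 x).mp h))
            · exact Or.inr ((i1 x).mpr h).1
          · intro hm
            rcases hm with h | h
            · exact List.mem_append.mpr (Or.inl ((h2 x).mpr ((hVmem x).mp h)))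
            · by_cases hs : x ∈ seen
              · exact List.mem_append.mpr (Or.inl hs)
              · have hxV : x ∉ V := fun hm2 => hs ((h2 x).mpr (Or.inl hm2))
                have hxP : x ∉ P := fun hm2 => hs ((h2 x).mpr (Or.inr hm2))
                have hx1 : x ∉ (P.foldl (pvStepA (pvGraphA (pvIndexA routes))) (V, ([] : List Int))).1 := by
                  intro hm2
                  rcases (hVmem x).mp hm2 with h3 | h3
                  · exact hxV h3
                  · exact hxP h3
                exact List.mem_append.mpr (Or.inr ((i1 x).mp ⟨h, hx1⟩))
        have i5 : ∀ x ∈ seen ++ Δ, pvVal routes x := by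
          intro x hm
          rcases List.mem_append.mp hm with h | h
          · exact h5 x h
          · obtain ⟨⟨r, _, stop, _, hx2⟩, _⟩ := (hmΔ x).mp h
            exact ((mem_idxG routes stop x).mp hx2).1
        have ind : (seen ++ Δ).Nodup := by
          rw [List.nodup_append]
          exact ⟨hnd, hndΔ, fun a ha b hb he => ((hmΔ b).mp hb).2 (he ▸ ha)⟩
        have i6 : (P.foldl (pvStepA (pvGraphA (pvIndexA routes))) (V, ([] : List Int))).2.length
            + pvS (pvGraphA (pvIndexA routes)) (P.foldl (pvStepA (pvGraphA (pvIndexA routes))) (V, ([] : List Int))).1 + 1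
            ≤ fA - P.length := by
          have hff := foldA_fuel _ (nodup_keys_graph routes) P V []
          simp only [List.length_nil, Nat.zero_add] at hff
          omega
        have i7 : Δ = [] ∨ routes.length + 1 ≤ fB + (seen ++ Δ).length := by
          rcases hΔe : Δ with _ | ⟨d, ds⟩
          · exact Or.inl rfl
          · right
            rcases h7 with h | h
            · exact absurd h (by simp)
            · rw [List.length_append]
              simp only [List.length_cons]
              omega
        exact ih (fA - P.length) (t+1)
          (P.foldl (pvStepA (pvGraphA (pvIndexA routes))) (V, ([] : List Int))).1
          (P.foldl (pvStepA (pvGraphA (pvIndexA routes))) (V, ([] : List Int))).2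
          (seen ++ Δ) Δ i1 i2 i5 ind i6 i7

-- ===== VERDICT (by name: the statement is the Claim_ definition above) =====
theorem leastNumBus_spec : Claim_equal_leastNumBus := by
  unfold Claim_equal_leastNumBus
  intro routes source target _
  unfold Spec_leastNumBus
  simp only [leastNumBus, leastNumBus_alt]
  by_cases hst : source = target
  · simp [hst]
  · have hbeq : (source == target) = false := by simp [hst]
    rw [hbeq]
    simp only [Bool.false_eq_true, if_false]
    have hidx : pvIndexB routes = pvIndexA routes := rfl
    rw [hidx]
    by_cases hcs : (pvIndexA routes).contains source = true
    · by_cases hct : (pvIndexA routes).contains target = true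
      · rw [if_neg (by rw [hcs, hct]; simp)]
        have h1 : ∀ x, (x ∈ (pvIndexA routes).getD source [] ∧ x ∉ (PySem.Set.empty : PySem.Set Int))
            ↔ x ∈ (pvIndexA routes).getD source [] := by
          intro x
          simp [PySem.Set.empty]
        have h2 : ∀ x, x ∈ PySem.Set.ofList ((pvIndexA routes).getD source [])
            ↔ (x ∈ (PySem.Set.empty : PySem.Set Int) ∨ x ∈ (pvIndexA routes).getD source []) := by
          intro x
          rw [PySem.Set.mem_ofList]
          simp [PySem.Set.empty]
        have h5 : ∀ x ∈ PySem.Set.ofList ((pvIndexA routes).getD source []), pvVal routes x := by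
          intro x hx
          rw [PySem.Set.mem_ofList] at hx
          exact ((mem_idxG routes source x).mp hx).1
        have h6 : ((pvIndexA routes).getD source []).length
              + pvS (pvGraphA (pvIndexA routes)) PySem.Set.empty + 1
            ≤ 1 + (((pvIndexA routes).getD source []).map (fun r => (r, (1 : Int)))).length
              + ((pvGraphA (pvIndexA routes)).values.map List.length).sum := by
          rw [pvS_empty, List.length_map]
          omega
        have h7 : (pvIndexA routes).getD source [] = []
            ∨ routes.length + 1 ≤ (routes.length + 2)
              + (PySem.Set.ofList ((pvIndexA routes).getD source [])).length := by
          right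
          omega
        exact bisim routes target (routes.length + 2) _ 1 PySem.Set.empty
          ((pvIndexA routes).getD source []) (PySem.Set.ofList ((pvIndexA routes).getD source []))
          ((pvIndexA routes).getD source []) h1 h2 h5 (PySem.Set.nodup_ofList _) h6 h7
      · rw [if_pos (by rw [Bool.not_eq_true] at hct; rw [hct]; simp)]
        have hall : ∀ r, pvHit routes target r = false := by
          intro r
          apply Bool.eq_false_iff.mpr
          intro hx
          obtain ⟨ro, hro, htg⟩ := hit_of_true hx
          obtain ⟨k, hk, hkv⟩ := List.mem_iff_getElem.mp hro
          apply hct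
          apply (idx_contains_iff routes target).mpr
          refine ⟨(k : Int), ⟨by simp, by exact_mod_cast hk⟩, ?_⟩
          have hrt : pvRt routes (k : Int) = routes[k] := by
            unfold pvRt
            rw [PySem.List.pyGet?_natCast, List.getElem?_eq_getElem hk]
            rfl
          rw [hrt, hkv]
          exact htg
        rw [loopB_noHit routes (pvIndexA routes) target hall]
    · rw [if_pos (by rw [Bool.not_eq_true] at hcs; rw [hcs]; simp)]
      have hfr : (pvIndexA routes).getD source [] = [] :=
        PySem.Dict.getD_of_not_contains _ _ (by rw [Bool.not_eq_true] at hcs; exact hcs)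
      rw [hfr]
      rw [loopB_nil]
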